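-- pv_equiv track=rewrite | github.com/ponson/CodeWar | 7kyuBarista_coffee.py | barista1
-- ===== SOURCE A (Python) =====
-- def make_coffee(order_remaining):
--     cook_time = order_remaining[0]
--     if len(order_remaining) > 1:
--         cook_time = cook_time + 2 + make_coffee(order_remaining[1:])
--         return cook_time
--     else:
--         return cook_time
--
-- def barista1(coffees):
--     if not bool(coffees):
--         return 0
--     coffees.sort()
--     total_time = 0
--     for i in range(len(coffees)):
--         total_time += make_coffee(coffees[:i+1])
--
--     return total_time
-- ===== SOURCE B (Python) =====
-- def barista1(coffees):
--     # Sort once, then a single pass with a running prefix sum: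
--     # cook time of the k-th prefix is prefix_sum + 2*k.
--     coffees.sort()
--     total = 0
--     run = 0
--     for i, c in enumerate(coffees):
--         run += c
--         total += run + 2 * i
--     return total
-- ===== Notes on version B (the rewrite author's own statement) =====
-- stated objective: faster
-- what changed: Replaces the per-prefix recursive make_coffee (a fresh slice and recursion for every prefix) by one sorted pass keeping a running prefix sum, using cook_time(prefix k) = prefix_sum + 2*k.
import Mathlib
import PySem

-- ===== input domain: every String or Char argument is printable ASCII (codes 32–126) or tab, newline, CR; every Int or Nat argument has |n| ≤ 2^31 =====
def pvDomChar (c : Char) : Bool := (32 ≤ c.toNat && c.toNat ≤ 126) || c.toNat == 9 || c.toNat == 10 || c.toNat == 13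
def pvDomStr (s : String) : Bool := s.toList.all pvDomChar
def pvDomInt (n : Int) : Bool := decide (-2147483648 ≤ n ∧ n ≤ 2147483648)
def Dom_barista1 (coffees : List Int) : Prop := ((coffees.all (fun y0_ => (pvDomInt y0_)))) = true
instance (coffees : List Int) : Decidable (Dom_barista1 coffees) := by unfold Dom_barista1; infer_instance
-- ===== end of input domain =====

-- B replaces A's per-prefix recursion by one sorted pass with a running prefix sum (asymptotically faster).
-- Both A and B sort the argument list in place in Python; the equivalence proved here is about the return value.

-- ===== PORT A =====
-- make_coffee: A only ever calls it on nonempty lists; the [] branch is never reached.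
def makeCoffee : List Int → Int
  | [] => 0
  | [x] => x
  | x :: y :: rest => x + 2 + makeCoffee (y :: rest)

def barista1 (coffees : List Int) : Int :=
  if coffees = [] then 0
  else
    let s := PySem.List.sorted coffees (fun x => x) false
    (PySem.List.pyRange 0 (coffees.length : Int) 1).foldl
      (fun total i => total + makeCoffee (PySem.List.slice s none (some (i + 1)))) 0

-- ===== PORT B =====
def barista1_alt (coffees : List Int) : Int :=
  let s := PySem.List.sorted coffees (fun x => x) false
  ((PySem.List.enumerate s 0).foldl
    (fun (st : Int × Int) p => (st.1 + p.2, st.2 + (st.1 + p.2) + 2 * p.1)) (0, 0)).2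

-- ===== PRECONDITION & SPEC =====
def Spec_barista1 (coffees : List Int) (out : Int) : Prop := out = barista1_alt coffees
instance (coffees : List Int) (out : Int) : Decidable (Spec_barista1 coffees out) := by unfold Spec_barista1; infer_instance

-- ===== CLAIM (what is proved, stated in full; the proofs are below) =====
def Claim_equal_barista1 : Prop := ∀ (coffees : List Int), Dom_barista1 coffees → Spec_barista1 coffees (barista1 coffees)

-- ===== LEMMAS AND PROOFS =====

-- cook time of a nonempty list: its sum plus 2 per extra cup
theorem makeCoffee_cons (x : Int) (l : List Int) :
    makeCoffee (x :: l) = x + l.sum + 2 * l.length := by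
  induction l generalizing x with
  | nil => simp [makeCoffee]
  | cons y t ih =>
    simp only [makeCoffee, ih y, List.sum_cons, List.length_cons]
    push_cast
    ring

-- B's loop invariant
theorem alt_foldl_inv (s : List Int) (i0 run tot : Int) :
    ((PySem.List.enumerate s i0).foldl
      (fun (st : Int × Int) p => (st.1 + p.2, st.2 + (st.1 + p.2) + 2 * p.1)) (run, tot)).2
    = tot + ((List.range s.length).map
        (fun k => run + (s.take (k + 1)).sum + 2 * (i0 + k))).sum := by
  induction s generalizing i0 run tot with
  | nil => simp [PySem.List.enumerate_nil]
  | cons c t ih =>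
    rw [PySem.List.enumerate_cons, List.foldl_cons, ih]
    have hmap : (List.range t.length).map
          (fun k => (run + c) + (t.take (k + 1)).sum + 2 * ((i0 + 1) + (k : Int)))
        = (List.range t.length).map
          ((fun k => run + (((c :: t).take (k + 1)).sum) + 2 * (i0 + (k : Int))) ∘ Nat.succ) := by
      apply List.map_congr_left
      intro k _
      simp only [Function.comp_apply, Nat.succ_eq_add_one, List.take_succ_cons, List.sum_cons]
      push_cast
      ring
    rw [List.length_cons, List.range_succ_eq_map, List.map_cons, List.map_map, List.sum_cons,
      ← hmap]
    simp only [List.take_succ_cons, List.take_zero, List.sum_cons, List.sum_nil]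
    push_cast
    ring

theorem barista1_eq_alt (coffees : List Int) : barista1 coffees = barista1_alt coffees := by
  by_cases h : coffees = []
  · subst h; decide
  · unfold barista1 barista1_alt
    rw [if_neg h]
    set s := PySem.List.sorted coffees (fun x => x) false with hs
    rw [alt_foldl_inv]
    have hlen : s.length = coffees.length := PySem.List.length_sorted ..
    rw [PySem.List.pyRange_one]
    simp only [sub_zero, Int.toNat_natCast, List.foldl_map, zero_add]
    rw [PySem.List.foldl_add]
    rw [← hlen, zero_add]
    congr 1
    apply List.map_congr_left
    intro k hk
    rw [List.mem_range] at hk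
    have : ((k : Int) + 1) = ((k + 1 : Nat) : Int) := by push_cast; ring
    rw [this, PySem.List.slice_to_natCast]
    have hlt : (s.take (k + 1)).length = k + 1 := by
      rw [List.length_take]; omega
    have hne : s.take (k + 1) ≠ [] := by
      intro h0; rw [h0] at hlt; simp at hlt
    obtain ⟨x, l, hxl⟩ := List.exists_cons_of_ne_nil hne
    have hl : l.length = k := by
      rw [hxl] at hlt; simpa using hlt
    rw [hxl, makeCoffee_cons, List.sum_cons, hl]

-- ===== VERDICT (by name: the statement is the Claim_ definition above) =====
theorem barista1_spec : Claim_equal_barista1 := by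
  intro coffees _
  unfold Spec_barista1
  exact barista1_eq_alt coffees
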